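-- pv_equiv track=rewrite | github.com/Zeronus/cs-archive | Assignment 6 Programming Python/t2048.py | doKeyRight
-- ===== SOURCE A (Python) =====
-- def doKeyRight(board):
--     new_board = []
--     for row in board:
--         lst = []
--         count = 0
--
--         for i in range(len(row)):
--             if row[i] == ' ':
--                 count += 1
--             else:
--                 lst.append(row[i])
--         for x in range(count):
--             lst.insert(0,' ')
--
--         index = len(lst) - 2
--
--         while index >= 0:
--             if lst[index] == ' ':
--                 break
--             if lst[index+1] == lst[index]:
--                 new_value = int(lst[index]) + int(lst[index+1])
--                 lst[index] = str(new_value)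
--                 lst[index+1] = ' '
--             index -= 1
--
--         ans = []
--         count2 = 0
--
--         for i in range(len(lst)):
--             if lst[i] == ' ':
--                 count2 += 1
--             else:
--                 ans.append(lst[i])
--         for x in range(count2):
--             ans.insert(0,' ')
--         new_board.append(ans)
--     if new_board == board:
--         return False,new_board
--     else:
--         return True,new_board
-- ===== SOURCE B (Python) =====
-- def doKeyRight(board):
--     new_board = []
--     for row in board:
--         merged = []
--         for t in reversed([c for c in row if c != ' ']):
--             if merged and merged[0] == t:
--                 merged[0] = str(int(t) + int(merged[0]))
--             else:
--                 merged.insert(0, t)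
--         new_board.append([' '] * (len(row) - len(merged)) + merged)
--     return new_board != board, new_board
-- ===== Notes on version B (the rewrite author's own statement) =====
-- stated objective: simpler
-- what changed: A compacts each row (count spaces, re-insert them), runs an index-based in-place merge loop over the padded list, then compacts again; B filters the tiles once and builds the merged row in a single right-to-left pass with an accumulator whose head is the still-mergeable neighbour, then left-pads once.
import Mathlib
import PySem

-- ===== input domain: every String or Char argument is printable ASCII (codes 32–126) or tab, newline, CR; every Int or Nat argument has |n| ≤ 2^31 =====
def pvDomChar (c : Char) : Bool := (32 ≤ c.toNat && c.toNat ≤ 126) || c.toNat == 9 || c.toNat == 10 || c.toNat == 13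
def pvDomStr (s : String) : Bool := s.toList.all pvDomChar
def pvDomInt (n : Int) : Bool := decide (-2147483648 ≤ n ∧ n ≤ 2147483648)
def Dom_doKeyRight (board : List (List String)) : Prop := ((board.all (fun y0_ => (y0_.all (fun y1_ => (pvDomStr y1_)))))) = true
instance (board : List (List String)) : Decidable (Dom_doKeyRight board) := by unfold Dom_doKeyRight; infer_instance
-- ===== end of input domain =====

-- B replaces A's compact/in-place-index-merge/compact per row by one filter and a single
-- right-to-left merging pass with an accumulator, then one left-pad (objective: simpler).


-- ===== PORT A =====
-- A's compaction (used twice, verbatim, in A): count the spaces, collect the tiles,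
-- then 'for x in range(count): lst.insert(0, " ")' = prepend count spaces.
def compactRow (row : List String) : List String :=
  let p := row.foldl (fun (p : List String × Nat) c =>
    if c = " " then (p.1, p.2 + 1) else (p.1 ++ [c], p.2)) ([], 0)
  List.replicate p.2 " " ++ p.1

-- A's while loop: fuel = index+1 (index runs len-2, len-3, …; break on a space cell).
-- lst[index]/lst[index+1] are in range whenever read (index ≤ len-2), so getD "" is exact;
-- where Python's int() raises ValueError (excluded by Pre_) the port continues unmerged.
def mergeLoopA (lst : List String) : Nat → List String
  | 0 => lst
  | f + 1 =>
    if lst.getD f "" = " " then lst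
    else if lst.getD (f + 1) "" = lst.getD f "" then
      match PySem.Int.ofStr? (lst.getD f ""), PySem.Int.ofStr? (lst.getD (f + 1) "") with
      | some a, some b =>
          mergeLoopA ((lst.set f (PySem.Int.toStr (a + b))).set (f + 1) " ") f
      | _, _ => mergeLoopA lst f
    else mergeLoopA lst f

def rowA (row : List String) : List String :=
  let lst := compactRow row
  compactRow (mergeLoopA lst (lst.length - 1))

def doKeyRight (board : List (List String)) : Bool × List (List String) :=
  let nb := board.foldl (fun acc row => acc ++ [rowA row]) []
  if nb = board then (false, nb) else (true, nb)

-- ===== PORT B =====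
-- one step of B's reversed-tiles loop: the accumulator head is the still-mergeable
-- right neighbour; where Python's int() raises ValueError (excluded by Pre_) the port
-- falls through to the no-merge case.
def mergeStep (t : String) (acc : List String) : List String :=
  match acc with
  | [] => [t]
  | h :: rest =>
    if h = t then
      match PySem.Int.ofStr? t, PySem.Int.ofStr? h with
      | some a, some b => PySem.Int.toStr (a + b) :: rest
      | _, _ => t :: h :: rest
    else t :: h :: rest

def rowAlt (row : List String) : List String :=
  let merged := (row.filter (fun c => c ≠ " ")).foldr mergeStep []
  List.replicate (row.length - merged.length) " " ++ merged

def doKeyRight_alt (board : List (List String)) : Bool × List (List String) :=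
  let nb := board.map rowAlt
  (!(nb = board : Bool), nb)

-- ===== PRECONDITION & SPEC =====
-- Pre_ excludes exactly the boards on which Python A raises ValueError: a row whose
-- space-filtered tiles contain two adjacent equal cells that int() cannot parse.
def Pre_doKeyRight (board : List (List String)) : Prop :=
  ∀ row ∈ board, List.IsChain (fun a b => a = b → PySem.Int.ofStr? a ≠ none)
      (row.filter (fun c => c ≠ " "))
instance (board : List (List String)) : Decidable (Pre_doKeyRight board) := by
  unfold Pre_doKeyRight; infer_instance
def pvWitness_doKeyRight : List (List String) := [["2", "2", " ", "4"], [" ", "x", "8", "8"]]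
def Spec_doKeyRight (board : List (List String)) (out : Bool × List (List String)) : Prop := out = doKeyRight_alt board
instance (board : List (List String)) (out : Bool × List (List String)) : Decidable (Spec_doKeyRight board out) := by unfold Spec_doKeyRight; infer_instance

-- ===== CLAIM (what is proved, stated in full; the proofs are below) =====
def Claim_equal_doKeyRight : Prop := ∀ (board : List (List String)), Dom_doKeyRight board → Pre_doKeyRight board → Spec_doKeyRight board (doKeyRight board)

-- ===== LEMMAS AND PROOFS =====

theorem digitChar_ne_space (m : Nat) : Nat.digitChar m ≠ ' ' := by
  rcases Nat.lt_or_ge m 16 with h | h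
  · interval_cases m <;> decide
  · unfold Nat.digitChar
    repeat rw [if_neg (by omega)]
    decide

theorem toDigitsCore_ne_space (b : Nat) :
    ∀ (f n : Nat) (acc : List Char), (∀ c ∈ acc, c ≠ ' ') →
      ∀ c ∈ Nat.toDigitsCore b f n acc, c ≠ ' ' := by
  intro f
  induction f with
  | zero => intro n acc hacc; simpa [Nat.toDigitsCore] using hacc
  | succ f ih =>
    intro n acc hacc
    simp only [Nat.toDigitsCore]
    split_ifs with h
    · intro c hc
      rcases List.mem_cons.1 hc with hc | hc
      · subst hc; exact digitChar_ne_space _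
      · exact hacc _ hc
    · refine ih _ _ ?_
      intro c hc
      rcases List.mem_cons.1 hc with hc | hc
      · subst hc; exact digitChar_ne_space _
      · exact hacc _ hc

-- str(int) is never the single-space cell, so a merged value survives the compaction
theorem toStr_ne_space (n : Int) : PySem.Int.toStr n ≠ " " := by
  intro h
  have h2 := congrArg String.toList h
  rw [PySem.Int.toList_toStr] at h2
  have hsp : (" " : String).toList = [' '] := by decide
  rw [hsp] at h2
  simp only [PySem.Int.toChars] at h2
  split_ifs at h2 with hn
  · simp at h2
  · exact toDigitsCore_ne_space 10 _ _ [] (by simp) ' '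
      (h2 ▸ List.mem_singleton.2 rfl) rfl

theorem compact_fold (row : List String) : ∀ (acc : List String) (cnt : Nat),
    row.foldl (fun (p : List String × Nat) c =>
        if c = " " then (p.1, p.2 + 1) else (p.1 ++ [c], p.2)) (acc, cnt)
      = (acc ++ row.filter (fun c => c ≠ " "), cnt + row.countP (fun c => c = " ")) := by
  induction row with
  | nil => simp
  | cons c row ih =>
    intro acc cnt
    by_cases h : c = " "
    · simp [h, ih]
      omega
    · simp [h, ih]

theorem compact_spec (row : List String) :
    compactRow row = List.replicate (row.countP (fun c => c = " ")) " "
      ++ row.filter (fun c => c ≠ " ") := by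
  unfold compactRow
  rw [compact_fold]
  simp

-- processing the top index of a cons list, then the rest, equals processing the tail
-- fully first and then one step at index 0 (no cell read by the break test is " ")
theorem mergeLoopA_split (t : String) :
    ∀ (f : Nat) (L : List String), (∀ i, i < f → L.getD i "" ≠ " ") →
      mergeLoopA (t :: L) (f + 1) = mergeLoopA (t :: mergeLoopA L f) 1 := by
  intro f
  induction f with
  | zero => intro L _; rfl
  | succ g ih =>
    intro L hL
    have hg : L.getD g "" ≠ " " := hL g (by omega)
    show mergeLoopA (t :: L) (g + 1 + 1) = _
    conv_lhs => rw [mergeLoopA]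
    simp only [List.getD_cons_succ, List.set_cons_succ]
    rw [if_neg hg]
    by_cases he : L.getD (g + 1) "" = L.getD g ""
    · rw [if_pos he]
      rcases ha : PySem.Int.ofStr? (L.getD g "") with _ | a <;>
        rcases hb : PySem.Int.ofStr? (L.getD (g + 1) "") with _ | b
      · have hinner : mergeLoopA L (g + 1) = mergeLoopA L g := by
          rw [mergeLoopA, if_neg hg, if_pos he, ha, hb]
        rw [hinner]
        exact ih L (fun i hi => hL i (by omega))
      · have hinner : mergeLoopA L (g + 1) = mergeLoopA L g := by
          rw [mergeLoopA, if_neg hg, if_pos he, ha, hb]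
        rw [hinner]
        exact ih L (fun i hi => hL i (by omega))
      · have hinner : mergeLoopA L (g + 1) = mergeLoopA L g := by
          rw [mergeLoopA, if_neg hg, if_pos he, ha, hb]
        rw [hinner]
        exact ih L (fun i hi => hL i (by omega))
      · have hinner : mergeLoopA L (g + 1)
            = mergeLoopA ((L.set g (PySem.Int.toStr (a + b))).set (g + 1) " ") g := by
          rw [mergeLoopA, if_neg hg, if_pos he, ha, hb]
        rw [hinner]
        refine ih ((L.set g (PySem.Int.toStr (a + b))).set (g + 1) " ") ?_
        intro i hi
        rw [List.getD_eq_getElem?_getD, List.getElem?_set_ne (by omega),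
          List.getElem?_set_ne (by omega), ← List.getD_eq_getElem?_getD]
        exact hL i (by omega)
    · rw [if_neg he]
      have hinner : mergeLoopA L (g + 1) = mergeLoopA L g := by
        rw [mergeLoopA, if_neg hg, if_neg he]
      rw [hinner]
      exact ih L (fun i hi => hL i (by omega))

-- a leading space cell shifts the whole loop by one position
theorem mergeLoopA_shift : ∀ (f : Nat) (L : List String),
    mergeLoopA (" " :: L) (f + 1) = " " :: mergeLoopA L f := by
  intro f
  induction f with
  | zero => intro L; rfl
  | succ g ih =>
    intro L
    show mergeLoopA (" " :: L) (g + 1 + 1) = _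
    conv_lhs => rw [mergeLoopA]
    conv_rhs => rw [mergeLoopA]
    simp only [List.getD_cons_succ, List.set_cons_succ]
    by_cases hg : L.getD g "" = " "
    · rw [if_pos hg, if_pos hg]
    · rw [if_neg hg, if_neg hg]
      by_cases he : L.getD (g + 1) "" = L.getD g ""
      · rw [if_pos he, if_pos he]
        rcases ha : PySem.Int.ofStr? (L.getD g "") with _ | a <;>
          rcases hb : PySem.Int.ofStr? (L.getD (g + 1) "") with _ | b <;>
            simp only [] <;> apply ih
      · rw [if_neg he, if_neg he]
        exact ih L

theorem mergeLoopA_pad (ts : List String) (f : Nat) :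
    ∀ (c : Nat), mergeLoopA (List.replicate c " " ++ ts) (c + f)
      = List.replicate c " " ++ mergeLoopA ts f := by
  intro c
  induction c with
  | zero => simp
  | succ c ih =>
    have : c + 1 + f = (c + f) + 1 := by omega
    rw [this, List.replicate_succ, List.cons_append, mergeLoopA_shift,
      ih, ← List.cons_append, ← List.replicate_succ]

theorem mergeLoopA_spaces (c : Nat) :
    mergeLoopA (List.replicate c " ") (c - 1) = List.replicate c " " := by
  match c with
  | 0 => rfl
  | 1 => rfl
  | c + 2 =>
    show mergeLoopA _ (c + 1) = _
    rw [mergeLoopA]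
    rw [if_pos (List.getD_replicate " " (by omega))]

-- the heart: on an all-tiles list, A's merge loop produces a list of the same length
-- whose head is B's merged head and whose space-filter is exactly B's merged row
theorem mergeLoopA_spec :
    ∀ (ts : List String), (∀ x ∈ ts, x ≠ " ") → ts ≠ [] →
      ∃ hd tl, mergeLoopA ts (ts.length - 1) = hd :: tl ∧ hd ≠ " " ∧
        tl.length + 1 = ts.length ∧
        ts.foldr mergeStep [] = hd :: tl.filter (fun c => c ≠ " ") := by
  intro ts
  induction ts with
  | nil => intro _ h; exact absurd rfl h
  | cons t ts ih =>
    intro hns _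
    have ht : t ≠ " " := hns t List.mem_cons_self
    rcases eq_or_ne ts [] with rfl | hne
    · exact ⟨t, [], rfl, ht, rfl, by simp [mergeStep]⟩
    · obtain ⟨hd, tl, hT, hhd, hlen, hM⟩ := ih (fun x hx => hns x (List.mem_cons_of_mem t hx)) hne
      have hlts : 1 ≤ ts.length := by
        cases ts with | nil => exact absurd rfl hne | cons a l => simp
      have hfuel : (t :: ts).length - 1 = (ts.length - 1) + 1 := by
        simp only [List.length_cons]; omega
      have hH : ∀ i, i < ts.length - 1 → ts.getD i "" ≠ " " := by
        intro i hi
        rw [List.getD_eq_getElem _ _ (by omega)]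
        exact hns _ (List.mem_cons_of_mem t (List.getElem_mem _))
      rw [hfuel, mergeLoopA_split t _ ts hH, hT]
      show ∃ hd' tl', mergeLoopA (t :: hd :: tl) 1 = _ ∧ _
      rw [mergeLoopA]
      simp only [List.getD_cons_zero, List.getD_cons_succ, List.set_cons_succ,
        List.set_cons_zero]
      rw [if_neg ht]
      by_cases he : hd = t
      · rw [if_pos (by simpa using he)]
        rcases ha : PySem.Int.ofStr? t with _ | a <;>
          rcases hb : PySem.Int.ofStr? hd with _ | b
        · exact ⟨t, hd :: tl, rfl, ht, by simpa using hlen,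
            by simp [List.foldr_cons, hM, mergeStep, he, ha, ht]⟩
        · rw [he, ha] at hb
          exact absurd hb (by simp)
        · rw [he, ha] at hb
          exact absurd hb (by simp)
        · have hab : a = b := by
            rw [he, ha] at hb
            exact Option.some.inj hb
          subst hab
          refine ⟨PySem.Int.toStr (a + a), " " :: tl, rfl, toStr_ne_space _, by simpa using hlen, ?_⟩
          simp [List.foldr_cons, hM, mergeStep, he, ha]
      · rw [if_neg (by simpa using he)]
        exact ⟨t, hd :: tl, rfl, ht, by simpa using hlen,
          by simp [List.foldr_cons, hM, mergeStep, he, hhd]⟩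

theorem space_partition (l : List String) :
    (l.filter (fun c => c ≠ " ")).length + l.countP (fun c => c = " ") = l.length := by
  have h := (List.length_eq_length_filter_add (l := l) (fun c => decide (c ≠ " "))).symm
  have hp : (fun a : String => !decide (a ≠ " ")) = (fun a : String => decide (a = " ")) := by
    funext a; simp [decide_not]
  rw [hp] at h
  rw [List.countP_eq_length_filter]
  exact h

theorem row_eq (row : List String) : rowA row = rowAlt row := by
  have hts : ∀ x ∈ row.filter (fun c => c ≠ " "), x ≠ " " := by
    intro x hx; simpa using (List.mem_filter.1 hx).2
  have hpart := space_partition row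
  rcases eq_or_ne (row.filter (fun c => c ≠ " ")) [] with hnil | hne
  · have h1 : compactRow row = List.replicate (row.countP (fun c => c = " ")) " " := by
      rw [compact_spec, hnil, List.append_nil]
    have h2 := mergeLoopA_spaces (row.countP (fun c => c = " "))
    simp only [rowA, rowAlt]
    rw [h1, List.length_replicate, h2, compact_spec, hnil]
    simp only [List.foldr_nil, List.length_nil, Nat.sub_zero, List.append_nil]
    rw [List.countP_replicate, List.filter_replicate]
    simp only [decide_true, if_true]
    have hc : row.countP (fun c => c = " ") = row.length := by
      rw [hnil] at hpart; simpa using hpart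
    simp [hc]
  · obtain ⟨hd, tl, hT, hhd, hlen, hM⟩ := mergeLoopA_spec _ hts hne
    have h1len : 1 ≤ (row.filter (fun c => c ≠ " ")).length := by
      cases h : row.filter (fun c => c ≠ " ") with
      | nil => exact absurd h hne
      | cons a l => simp
    have h1 : compactRow row = List.replicate (row.countP (fun c => c = " ")) " "
        ++ row.filter (fun c => c ≠ " ") := compact_spec row
    have hfuel : (List.replicate (row.countP (fun c => c = " ")) " "
        ++ row.filter (fun c => c ≠ " ")).length - 1
        = row.countP (fun c => c = " ") + ((row.filter (fun c => c ≠ " ")).length - 1) := by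
      simp only [List.length_append, List.length_replicate]; omega
    simp only [rowA, rowAlt]
    rw [h1, hfuel, mergeLoopA_pad, hT, compact_spec, hM]
    have hfilter : (List.replicate (row.countP (fun c => c = " ")) " "
        ++ hd :: tl).filter (fun c => c ≠ " ") = hd :: tl.filter (fun c => c ≠ " ") := by
      simp [List.filter_append, hhd]
    have hcnt : (List.replicate (row.countP (fun c => c = " ")) " "
        ++ hd :: tl).countP (fun x => x = " ")
        = row.countP (fun c => c = " ") + tl.countP (fun x => x = " ") := by
      simp [List.countP_append, List.countP_replicate, hhd]
    rw [hfilter, hcnt]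
    have htl := space_partition tl
    congr 2
    simp only [List.length_cons]
    omega

-- ===== VERDICT (by name: the statement is the Claim_ definition above) =====
theorem doKeyRight_spec : Claim_equal_doKeyRight := by
  intro board _ _
  unfold Spec_doKeyRight doKeyRight doKeyRight_alt
  rw [PySem.List.foldl_append_singleton_eq_map]
  simp only [List.nil_append]
  have hmap : board.map rowA = board.map rowAlt := List.map_congr_left (fun r _ => row_eq r)
  rw [hmap]
  split_ifs with h
  · simp [h]
  · simp [h]
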